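-- pv_equiv track=rewrite | github.com/Maxli53/Fuzzy_oss20 | stage_01_data_engine/core/base_collector.py | categorize_storage_keys
-- ===== SOURCE A (Python) =====
-- from typing import Dict, List, Optional, Any, Union
--
-- def categorize_storage_keys(keys: List[str]) -> Dict[str, List[str]]:
--     """
--     Categorize a list of storage keys by their namespace.
--
--     Args:
--         keys: List of storage keys
--
--     Returns:
--         Dictionary mapping categories to their keys
--     """
--     categorized = {
--         'equity': [],
--         'dtn_calculated': [],
--         'options': [],
--         'futures': [],
--         'forex': [],
--         'unknown': []
--     }
--
--     for key in keys:
--         parts = key.split('/')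
--         if len(parts) > 0:
--             category = parts[0]
--             if category in categorized:
--                 categorized[category].append(key)
--             else:
--                 categorized['unknown'].append(key)
--
--     return categorized
-- ===== SOURCE B (Python) =====
-- def categorize_storage_keys(keys):
--     """Categorize a list of storage keys by their namespace.
--
--     Bucket-by-bucket: one filtering pass per category instead of one
--     assigning pass over the keys.
--     """
--     known = ['equity', 'dtn_calculated', 'options', 'futures', 'forex']
--     result = {cat: [k for k in keys if k.split('/')[0] == cat] for cat in known}
--     result['unknown'] = [k for k in keys if k.split('/')[0] not in known]
--     return result
-- ===== Notes on version B (the rewrite author's own statement) =====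
-- stated objective: alternative
-- what changed: B builds the result category-by-category with one filter pass of the key list per bucket (and a final not-in-known pass for 'unknown'), instead of A's single pass that dispatches each key into a pre-built dict.
import Mathlib
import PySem

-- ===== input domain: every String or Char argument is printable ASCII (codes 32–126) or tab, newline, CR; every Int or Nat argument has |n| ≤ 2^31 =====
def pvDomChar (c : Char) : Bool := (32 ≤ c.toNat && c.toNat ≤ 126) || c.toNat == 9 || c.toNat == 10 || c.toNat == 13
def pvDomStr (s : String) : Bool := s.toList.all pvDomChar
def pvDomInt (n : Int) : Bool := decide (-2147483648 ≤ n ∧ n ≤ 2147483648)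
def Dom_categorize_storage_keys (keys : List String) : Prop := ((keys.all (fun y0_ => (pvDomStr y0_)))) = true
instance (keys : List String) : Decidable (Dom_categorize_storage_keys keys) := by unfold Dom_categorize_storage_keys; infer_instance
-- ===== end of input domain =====

-- B builds the result category-by-category (one filter pass per bucket) instead of A's
-- single assigning pass over the keys; same return value, proved equal on all inputs.

-- ===== PORT A =====
def categorize_storage_keys (keys : List String) : List (String × List String) :=
  let init : PySem.Dict String (List String) :=
    PySem.Dict.ofList
      [("equity", []), ("dtn_calculated", []), ("options", []),
       ("futures", []), ("forex", []), ("unknown", [])]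
  let final := keys.foldl (fun d key =>
    let parts := (PySem.Str.split? key "/").getD []   -- sep "/" ≠ "" so split? is always some
    if parts.length > 0 then
      let category := parts.headD ""                  -- parts[0], guarded by the length check
      if d.contains category then
        d.modify category [] (fun l => l ++ [key])    -- categorized[category].append(key)
      else
        d.modify "unknown" [] (fun l => l ++ [key])   -- categorized['unknown'].append(key)
    else d) init
  final.items

-- ===== PORT B =====
def pvKnown : List String := ["equity", "dtn_calculated", "options", "futures", "forex"]

-- key.split('/')[0]; split never returns an empty list, so [0] is headD
def pvPrefix (k : String) : String := ((PySem.Str.split? k "/").getD []).headD ""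

def categorize_storage_keys_alt (keys : List String) : List (String × List String) :=
  pvKnown.map (fun cat => (cat, keys.filter (fun k => pvPrefix k == cat)))
    ++ [("unknown", keys.filter (fun k => !(pvKnown.contains (pvPrefix k))))]

-- ===== PRECONDITION & SPEC =====
def Spec_categorize_storage_keys (keys : List String) (out : List (String × List String)) : Prop := out = categorize_storage_keys_alt keys
instance (keys : List String) (out : List (String × List String)) : Decidable (Spec_categorize_storage_keys keys out) := by unfold Spec_categorize_storage_keys; infer_instance

-- ===== CLAIM (what is proved, stated in full; the proofs are below) =====
def Claim_equal_categorize_storage_keys : Prop := ∀ (keys : List String), Dom_categorize_storage_keys keys → Spec_categorize_storage_keys keys (categorize_storage_keys keys)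

-- ===== LEMMAS AND PROOFS =====

-- splitOn.go always produces at least one piece
theorem pv_go_ne_nil (sep : List Char) :
    ∀ (fuel : Nat) (l cur : List Char) (acc : List (List Char)),
      PySem.Chars.splitOn.go sep fuel l cur acc ≠ [] := by
  intro fuel
  induction fuel with
  | zero =>
      intro l cur acc
      simp [PySem.Chars.splitOn.go]
  | succ n ih =>
      intro l cur acc
      cases l with
      | nil => simp [PySem.Chars.splitOn.go]
      | cons c rest =>
          rw [PySem.Chars.splitOn.go]
          split
          · exact ih _ _ _
          · exact ih _ _ _

theorem pv_parts_ne_nil (k : String) : (PySem.Str.split? k "/").getD [] ≠ [] := by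
  simp [PySem.Str.split?, PySem.Chars.split?, PySem.Chars.splitOn]
  intro h
  exact pv_go_ne_nil _ _ _ _ _ h

-- one step of A's loop on the six-bucket dict
theorem pv_step (key : String) (a b c d e f : List String) :
    (let parts := (PySem.Str.split? key "/").getD [];
     if parts.length > 0 then
       let category := parts.headD "";
       if (PySem.Dict.mk
            [("equity", a), ("dtn_calculated", b), ("options", c),
             ("futures", d), ("forex", e), ("unknown", f)]).contains category = true then
         (PySem.Dict.mk
            [("equity", a), ("dtn_calculated", b), ("options", c),
             ("futures", d), ("forex", e), ("unknown", f)]).modify category [] (fun l => l ++ [key])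
       else
         (PySem.Dict.mk
            [("equity", a), ("dtn_calculated", b), ("options", c),
             ("futures", d), ("forex", e), ("unknown", f)]).modify "unknown" [] (fun l => l ++ [key])
     else
       PySem.Dict.mk
         [("equity", a), ("dtn_calculated", b), ("options", c),
          ("futures", d), ("forex", e), ("unknown", f)])
    = PySem.Dict.mk
        [("equity", a ++ if pvPrefix key == "equity" then [key] else []),
         ("dtn_calculated", b ++ if pvPrefix key == "dtn_calculated" then [key] else []),
         ("options", c ++ if pvPrefix key == "options" then [key] else []),
         ("futures", d ++ if pvPrefix key == "futures" then [key] else []),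
         ("forex", e ++ if pvPrefix key == "forex" then [key] else []),
         ("unknown", f ++ if !(pvKnown.contains (pvPrefix key)) then [key] else [])] := by
  have hlen := List.length_pos_of_ne_nil (pv_parts_ne_nil key)
  have hpre : ((PySem.Str.split? key "/").getD []).headD "" = pvPrefix key := rfl
  simp only [gt_iff_lt, hlen, if_true, hpre]
  by_cases h1 : pvPrefix key = "equity"
  · simp [h1, PySem.Dict.contains, PySem.Dict.modify, PySem.Dict.insert,
          PySem.Dict.getD, PySem.Dict.get?, pvKnown]
  by_cases h2 : pvPrefix key = "dtn_calculated"
  · simp [h2, PySem.Dict.contains, PySem.Dict.modify, PySem.Dict.insert,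
          PySem.Dict.getD, PySem.Dict.get?, pvKnown]
  by_cases h3 : pvPrefix key = "options"
  · simp [h3, PySem.Dict.contains, PySem.Dict.modify, PySem.Dict.insert,
          PySem.Dict.getD, PySem.Dict.get?, pvKnown]
  by_cases h4 : pvPrefix key = "futures"
  · simp [h4, PySem.Dict.contains, PySem.Dict.modify, PySem.Dict.insert,
          PySem.Dict.getD, PySem.Dict.get?, pvKnown]
  by_cases h5 : pvPrefix key = "forex"
  · simp [h5, PySem.Dict.contains, PySem.Dict.modify, PySem.Dict.insert,
          PySem.Dict.getD, PySem.Dict.get?, pvKnown]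
  by_cases h6 : pvPrefix key = "unknown"
  · simp [h6, PySem.Dict.contains, PySem.Dict.modify, PySem.Dict.insert,
          PySem.Dict.getD, PySem.Dict.get?, pvKnown, beq_iff_eq]
  · simp [h1, h2, h3, h4, h5, Ne.symm h1, Ne.symm h2, Ne.symm h3, Ne.symm h4, Ne.symm h5,
          Ne.symm h6, PySem.Dict.contains, PySem.Dict.modify, PySem.Dict.insert,
          PySem.Dict.getD, PySem.Dict.get?, pvKnown, beq_iff_eq]

theorem pv_inv (keys : List String) :
    ∀ (a b c d e f : List String),
    keys.foldl (fun (d : PySem.Dict String (List String)) key =>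
      let parts := (PySem.Str.split? key "/").getD []
      if parts.length > 0 then
        let category := parts.headD ""
        if d.contains category then
          d.modify category [] (fun l => l ++ [key])
        else
          d.modify "unknown" [] (fun l => l ++ [key])
      else d)
      (PySem.Dict.mk
        [("equity", a), ("dtn_calculated", b), ("options", c),
         ("futures", d), ("forex", e), ("unknown", f)])
    = PySem.Dict.mk
        [("equity", a ++ keys.filter (fun k => pvPrefix k == "equity")),
         ("dtn_calculated", b ++ keys.filter (fun k => pvPrefix k == "dtn_calculated")),
         ("options", c ++ keys.filter (fun k => pvPrefix k == "options")),
         ("futures", d ++ keys.filter (fun k => pvPrefix k == "futures")),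
         ("forex", e ++ keys.filter (fun k => pvPrefix k == "forex")),
         ("unknown", f ++ keys.filter (fun k => !(pvKnown.contains (pvPrefix k))))] := by
  induction keys with
  | nil => intro a b c d e f; simp
  | cons key rest ih =>
      intro a b c d e f
      rw [List.foldl_cons, pv_step, ih]
      simp only [PySem.Dict.mk.injEq, List.cons.injEq, Prod.mk.injEq, List.filter_cons, true_and,
                 and_true]
      refine ⟨?_, ?_, ?_, ?_, ?_, ?_⟩ <;> (split <;> simp)

-- ===== VERDICT (by name: the statement is the Claim_ definition above) =====
theorem categorize_storage_keys_spec : Claim_equal_categorize_storage_keys := by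
  intro keys _
  unfold Spec_categorize_storage_keys categorize_storage_keys categorize_storage_keys_alt
  have hinit : (PySem.Dict.ofList
      [("equity", []), ("dtn_calculated", []), ("options", []),
       ("futures", []), ("forex", []), ("unknown", ([] : List String))])
      = PySem.Dict.mk
      [("equity", []), ("dtn_calculated", []), ("options", []),
       ("futures", []), ("forex", []), ("unknown", [])] := by decide
  have h := pv_inv keys [] [] [] [] [] []
  simp only [List.nil_append] at h
  simp only [hinit, h]
  simp [pvKnown]
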